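-- pv_equiv track=rewrite | github.com/Vladymyr-Chuchkanov/ISLabs | main1.py | remove_dead_ends
-- ===== SOURCE A (Python) =====
-- import copy
--
-- def check_dead_end(arr, cell, col_bound, row_bound):
--     if cell[0]<= 0 or cell[0]>=col_bound or cell[1]>=row_bound or cell[1]<=0:
--         return False
--
--     calc = 0
--     neighbors = []
--     for cell0 in arr:
--         if (cell0[0]==cell[0] and (cell0[1]+1==cell[1] or cell0[1]-1==cell[1])) or (cell0[1]==cell[1] and (cell0[0]+1==cell[0] or cell0[0]-1==cell[0])):
--             calc+=1
--             neighbors.append(cell0)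
--     if calc == 1:
--         return True
--     return False
--
-- def remove_dead_ends(arr, col_bound, row_bound):
--     arr_copy = copy.deepcopy(arr)
--
--     while len(arr_copy)>0:
--         el = arr_copy.pop(0)
--         if check_dead_end(arr, el, col_bound, row_bound):
--             arr.remove(el)
--             arr_copy = copy.deepcopy(arr)
--     return arr
-- ===== SOURCE B (Python) =====
-- # Event-driven worklist algorithm: build neighbor counts and a coordinate->indices
-- # index once, seed a set of dead-end indices, then repeatedly extract the smallest
-- # dead index and locally repair the statuses of the (at most four) affected
-- # coordinates -- no rescan of the array ever happens.  Correct because removing a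
-- # cell at (x,y) only changes the neighbor count (hence dead-end status) of cells
-- # located at the four coordinates adjacent to (x,y), and A always removes the
-- # first-in-list dead end, i.e. the alive dead index with the smallest position.
-- # Like A, mutates arr in place to the same final contents and returns it.
-- def remove_dead_ends(arr, col_bound, row_bound):
--     n = len(arr)
--     counts = {}
--     for c in arr:
--         k = (c[0], c[1])
--         counts[k] = counts.get(k, 0) + 1
--     pos = {}
--     for i in range(n):
--         k = (arr[i][0], arr[i][1])
--         pos[k] = pos.get(k, []) + [i]
--
--     def dead(i):
--         x, y = arr[i][0], arr[i][1]
--         if not (0 < x < col_bound and 0 < y < row_bound):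
--             return False
--         return (counts.get((x, y - 1), 0) + counts.get((x, y + 1), 0)
--                 + counts.get((x - 1, y), 0) + counts.get((x + 1, y), 0)) == 1
--
--     alive = [True] * n
--     dead_set = {i for i in range(n) if dead(i)}
--     while dead_set:
--         m = min(dead_set)
--         dead_set.discard(m)
--         alive[m] = False
--         x, y = arr[m][0], arr[m][1]
--         counts[(x, y)] -= 1
--         for k in ((x, y - 1), (x, y + 1), (x - 1, y), (x + 1, y)):
--             for j in pos.get(k, []):
--                 if alive[j]:
--                     if dead(j):
--                         dead_set.add(j)
--                     else:
--                         dead_set.discard(j)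
--     result = [arr[i] for i in range(n) if alive[i]]
--     arr[:] = result
--     return arr
-- ===== Notes on version B (the rewrite author's own statement) =====
-- stated objective: faster
-- what changed: Replaces A's restart-and-rescan (deepcopy the list, scan every cell, count its neighbors by a full pass over the array) with an event-driven worklist: neighbor counts and a coordinate-to-indices index built once, a maintained set of dead indices seeded once, and after each removal only the at-most-four affected coordinates have their statuses repaired locally; the next victim is the minimum of the dead set, never found by rescanning.
-- outside the precondition, e.g. on remove_dead_ends([[0]], 5, 5): A returns [[0]], B raises IndexError
import Mathlib
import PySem

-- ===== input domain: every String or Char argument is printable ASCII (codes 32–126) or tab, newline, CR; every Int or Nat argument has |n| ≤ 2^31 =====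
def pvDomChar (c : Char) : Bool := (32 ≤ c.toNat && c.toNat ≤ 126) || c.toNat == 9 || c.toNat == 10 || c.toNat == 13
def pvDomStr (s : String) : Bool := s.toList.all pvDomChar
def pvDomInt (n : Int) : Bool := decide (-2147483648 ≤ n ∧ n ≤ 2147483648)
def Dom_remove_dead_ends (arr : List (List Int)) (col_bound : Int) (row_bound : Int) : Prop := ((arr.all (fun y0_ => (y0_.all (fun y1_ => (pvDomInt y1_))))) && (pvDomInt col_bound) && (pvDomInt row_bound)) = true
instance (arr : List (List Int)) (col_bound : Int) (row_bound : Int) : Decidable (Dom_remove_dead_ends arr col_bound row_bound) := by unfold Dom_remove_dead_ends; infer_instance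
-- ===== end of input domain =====

-- B replaces A's restart-and-rescan by an event-driven worklist (neighbor counts + a
-- coordinate→indices index built once, a maintained set of dead indices repaired locally
-- after each removal); equivalence is about the RETURN value (both Pythons also mutate
-- arr in place to the same final contents).


-- ===== PORT A =====
-- check_dead_end(arr, cell, col_bound, row_bound); the 'neighbors' list A builds is never read,
-- only 'calc' matters.  cell[0]/cell[1] are pyGet?: the 'none' branches are where Python raises
-- IndexError (excluded by Pre_; a one-coordinate cell that fails the bound test on cell[0] alone
-- returns False in Python and false here alike).
def pvCheckDeadEnd (arr : List (List Int)) (cell : List Int) (col_bound row_bound : Int) : Bool :=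
  match PySem.List.pyGet? cell 0, PySem.List.pyGet? cell 1 with
  | some x, some y =>
    if x ≤ 0 || x ≥ col_bound || y ≥ row_bound || y ≤ 0 then false
    else
      (arr.foldl (fun acc c0 =>
        match PySem.List.pyGet? c0 0, PySem.List.pyGet? c0 1 with
        | some x0, some y0 =>
          if (x0 == x && (y0 + 1 == y || y0 - 1 == y)) || (y0 == y && (x0 + 1 == x || x0 - 1 == x))
          then acc + 1 else acc
        | _, _ => acc) (0 : Int)) == 1
  | _, _ => false

-- the while-loop: state = (arr, arr_copy); pop(0) walks arr_copy, a removal resets arr_copy to arr.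
-- remove? none is Python's ValueError path, unreachable since el is popped from a snapshot of arr.
def pvLoopA (col_bound row_bound : Int) : List (List Int) → List (List Int) → List (List Int)
  | arr, [] => arr
  | arr, el :: rest =>
    if pvCheckDeadEnd arr el col_bound row_bound then
      match h : PySem.List.remove? arr el with
      | some arr2 => pvLoopA col_bound row_bound arr2 arr2
      | none => arr
    else pvLoopA col_bound row_bound arr rest
  termination_by arr copy => (arr.length, copy.length)
  decreasing_by
  · have hmem : el ∈ arr := by
      by_contra hn
      rw [(PySem.List.remove?_eq_none_iff arr el).mpr hn] at h; cases h
    have h2 : arr2 = arr.erase el := by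
      rw [PySem.List.remove?_eq_some_erase arr el hmem] at h; exact (Option.some.inj h).symm
    have hle : (arr.erase el).length = arr.length - 1 := List.length_erase_of_mem hmem
    rw [← h2] at hle
    have hpos : 0 < arr.length := List.length_pos_of_mem hmem
    left; omega
  · right; simp

def remove_dead_ends (arr : List (List Int)) (col_bound : Int) (row_bound : Int) : List (List Int) :=
  pvLoopA col_bound row_bound arr arr

-- ===== PORT B =====
-- (c[0], c[1]) as a dict key; none = Python's IndexError on a short cell (excluded by Pre_).
def pvCoords? (c : List Int) : Option (Int × Int) :=
  match PySem.List.pyGet? c 0, PySem.List.pyGet? c 1 with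
  | some x, some y => some (x, y)
  | _, _ => none

-- counts = {}; for c in arr: counts[k] = counts.get(k, 0) + 1
def pvBuildCounts (arr : List (List Int)) : PySem.Dict (Int × Int) Int :=
  arr.foldl (fun d c =>
    match pvCoords? c with
    | some k => d.insert k (d.getD k 0 + 1)
    | none => d) PySem.Dict.empty

-- pos = {}; for i in range(n): pos[k] = pos.get(k, []) + [i]
def pvBuildPos (arr : List (List Int)) : PySem.Dict (Int × Int) (List Nat) :=
  (List.range arr.length).foldl (fun d i =>
    match arr[i]? >>= pvCoords? with
    | some k => d.insert k (d.getD k [] ++ [i])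
    | none => d) PySem.Dict.empty

-- the body of B's dead(i) test on a cell value: in bounds and exactly one neighbor by counter lookups
def pvDeadCell (counts : PySem.Dict (Int × Int) Int) (col_bound row_bound : Int) (c : List Int) : Bool :=
  match pvCoords? c with
  | some (x, y) =>
    if 0 < x && x < col_bound && 0 < y && y < row_bound then
      (counts.getD (x, y - 1) 0 + counts.getD (x, y + 1) 0 +
       counts.getD (x - 1, y) 0 + counts.getD (x + 1, y) 0) == 1
    else false
  | none => false

-- dead(i): looks the cell up by index (arr never changes in B; alive flags do)
def pvDeadIdx (arr : List (List Int)) (counts : PySem.Dict (Int × Int) Int)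
    (col_bound row_bound : Int) (i : Nat) : Bool :=
  match arr[i]? with
  | some c => pvDeadCell counts col_bound row_bound c
  | none => false

-- the repair loop: for k in (4 coords): for j in pos.get(k, []): if alive[j]: add/discard j
-- (js is the concatenation of the four pos lists, in Python's iteration order)
def pvRepair (arr : List (List Int)) (counts : PySem.Dict (Int × Int) Int)
    (col_bound row_bound : Int) (alive : List Bool) (dead : List Nat) (js : List Nat) : List Nat :=
  js.foldl (fun d j =>
    if alive.getD j false then
      if pvDeadIdx arr counts col_bound row_bound j then PySem.Set.add d j
      else PySem.Set.discard d j
    else d) dead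

-- termination helper for the loop below (cited by decreasing_by)
theorem pv_count_set_lt (l : List Bool) (m : Nat) (h : l.getD m false = true) :
    (l.set m false).count true < l.count true := by
  induction l generalizing m with
  | nil => simp [List.getD] at h
  | cons b t ih =>
    cases m with
    | zero =>
      simp only [List.getD_cons_zero] at h
      subst h
      simp [List.count_cons]
    | succ m =>
      simp only [List.getD_cons_succ] at h
      have := ih m h
      have hset : (b :: t).set (m + 1) false = b :: t.set m false := rfl
      rw [hset, List.count_cons, List.count_cons]
      split <;> omega

-- while dead_set: m = min(dead_set); discard; alive[m] = False; decrement counts at (x,y);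
-- repair statuses at the four neighbor coordinates.  The 'alive[m]' guard only makes the
-- recursion total (under the loop invariant m is always alive); Python never reaches it false.
def pvLoopB (arr : List (List Int)) (col_bound row_bound : Int)
    (pos : PySem.Dict (Int × Int) (List Nat)) :
    PySem.Dict (Int × Int) Int → List Bool → List Nat → List Bool
  | counts, alive, dead =>
    match hmin : PySem.List.min? dead (fun x => x) with
    | none => alive
    | some m =>
      let dead1 := PySem.Set.discard dead m
      if hal : alive.getD m false = true then
        let alive' := alive.set m false
        match arr[m]? >>= pvCoords? with
        | none => alive'   -- unreachable under Pre_ (Python raised during the build loops)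
        | some (x, y) =>
          let counts' := counts.insert (x, y) (counts.getD (x, y) 0 - 1)
          let js := pos.getD (x, y - 1) [] ++ pos.getD (x, y + 1) [] ++
                    pos.getD (x - 1, y) [] ++ pos.getD (x + 1, y) []
          pvLoopB arr col_bound row_bound pos counts' alive'
            (pvRepair arr counts' col_bound row_bound alive' dead1 js)
      else pvLoopB arr col_bound row_bound pos counts alive dead1
  termination_by counts alive dead => (alive.count true, dead.length)
  decreasing_by
  · left; exact pv_count_set_lt alive m hal
  · right
    have hmem : m ∈ dead := PySem.List.min?_mem hmin
    simp only [PySem.Set.discard]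
    exact List.length_filter_lt_length_iff_exists.mpr ⟨m, hmem, by simp⟩

-- result = [arr[i] for i in range(n) if alive[i]]
def pvLive (arr : List (List Int)) (alive : List Bool) : List (List Int) :=
  (List.range arr.length).filterMap (fun i => if alive.getD i false then arr[i]? else none)

def remove_dead_ends_alt (arr : List (List Int)) (col_bound : Int) (row_bound : Int) : List (List Int) :=
  let counts := pvBuildCounts arr
  let pos := pvBuildPos arr
  let dead0 := (List.range arr.length).filter (pvDeadIdx arr counts col_bound row_bound)
  pvLive arr (pvLoopB arr col_bound row_bound pos counts (List.replicate arr.length true) dead0)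

-- ===== PRECONDITION & SPEC =====
-- Pre_ excludes cells with fewer than two coordinates: on those A raises IndexError, except when
-- every such cell already fails the bound test on its first coordinate, where A returns arr
-- unchanged while B raises (see cites).
def Pre_remove_dead_ends (arr : List (List Int)) (col_bound : Int) (row_bound : Int) : Prop :=
  ∀ c ∈ arr, 2 ≤ c.length
instance (arr : List (List Int)) (col_bound : Int) (row_bound : Int) : Decidable (Pre_remove_dead_ends arr col_bound row_bound) := by unfold Pre_remove_dead_ends; infer_instance

def pvWitness_remove_dead_ends : List (List Int) × Int × Int := ([[1, 1], [1, 2], [2, 1]], 3, 4)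

def Spec_remove_dead_ends (arr : List (List Int)) (col_bound : Int) (row_bound : Int) (out : List (List Int)) : Prop := out = remove_dead_ends_alt arr col_bound row_bound
instance (arr : List (List Int)) (col_bound : Int) (row_bound : Int) (out : List (List Int)) : Decidable (Spec_remove_dead_ends arr col_bound row_bound out) := by unfold Spec_remove_dead_ends; infer_instance

-- ===== CLAIM (what is proved, stated in full; the proofs are below) =====
def Claim_equal_remove_dead_ends : Prop := ∀ (arr : List (List Int)) (col_bound : Int) (row_bound : Int), Dom_remove_dead_ends arr col_bound row_bound → Pre_remove_dead_ends arr col_bound row_bound → Spec_remove_dead_ends arr col_bound row_bound (remove_dead_ends arr col_bound row_bound)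

-- ===== LEMMAS AND PROOFS =====

-- number of cells of l whose first two coordinates form the pair k
def pvCnt (l : List (List Int)) (k : Int × Int) : Int :=
  ((l.countP (fun c => pvCoords? c == some k) : Nat) : Int)

theorem pvBuildCounts_aux (l : List (List Int)) (d : PySem.Dict (Int × Int) Int) (k : Int × Int) :
    (l.foldl (fun d c =>
      match pvCoords? c with
      | some k => d.insert k (d.getD k 0 + 1)
      | none => d) d).getD k 0 = d.getD k 0 + pvCnt l k := by
  induction l generalizing d with
  | nil => simp [pvCnt]
  | cons c t ih =>
    simp only [List.foldl_cons]
    cases hc : pvCoords? c with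
    | none =>
      rw [show (match (none : Option (Int × Int)) with
          | some k => d.insert k (d.getD k 0 + 1)
          | none => d) = d from rfl]
      rw [ih]
      simp [pvCnt, List.countP_cons, hc]
    | some k0 =>
      rw [show (match some k0 with
          | some k => d.insert k (d.getD k 0 + 1)
          | none => d) = d.insert k0 (d.getD k0 0 + 1) from rfl]
      rw [ih, PySem.Dict.getD_insert]
      by_cases hk : k = k0
      · subst hk
        simp [pvCnt, List.countP_cons, hc]
        push_cast
        ring
      · simp only [hk, if_false, pvCnt, List.countP_cons, hc]
        have : (some k0 == some k) = false := by
          simp [Ne.symm hk]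
        rw [this]
        push_cast
        ring

theorem pvBuildCounts_spec (arr : List (List Int)) (k : Int × Int) :
    (pvBuildCounts arr).getD k 0 = pvCnt arr k := by
  unfold pvBuildCounts
  rw [pvBuildCounts_aux]
  simp [PySem.Dict.empty, PySem.Dict.getD, PySem.Dict.get?]

-- A's neighbor-counting fold equals the sum of the four coordinate counts
theorem pvCalc_eq (l : List (List Int)) (x y : Int) (a : Int) :
    l.foldl (fun acc c0 =>
        match PySem.List.pyGet? c0 0, PySem.List.pyGet? c0 1 with
        | some x0, some y0 =>
          if (x0 == x && (y0 + 1 == y || y0 - 1 == y)) || (y0 == y && (x0 + 1 == x || x0 - 1 == x))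
          then acc + 1 else acc
        | _, _ => acc) a
      = a + (pvCnt l (x, y - 1) + pvCnt l (x, y + 1) + pvCnt l (x - 1, y) + pvCnt l (x + 1, y)) := by
  induction l generalizing a with
  | nil => simp [pvCnt]
  | cons c0 t ih =>
    simp only [List.foldl_cons]
    cases h0 : PySem.List.pyGet? c0 0 with
    | none =>
      rw [show (match (none : Option Int), PySem.List.pyGet? c0 1 with
          | some x0, some y0 =>
            if (x0 == x && (y0 + 1 == y || y0 - 1 == y)) || (y0 == y && (x0 + 1 == x || x0 - 1 == x))
            then a + 1 else a
          | _, _ => a) = a from by cases PySem.List.pyGet? c0 1 <;> rfl]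
      rw [ih]
      simp [pvCnt, List.countP_cons, pvCoords?, h0]
    | some x0 =>
      cases h1 : PySem.List.pyGet? c0 1 with
      | none =>
        rw [show (match some x0, (none : Option Int) with
            | some x0, some y0 =>
              if (x0 == x && (y0 + 1 == y || y0 - 1 == y)) || (y0 == y && (x0 + 1 == x || x0 - 1 == x))
              then a + 1 else a
            | _, _ => a) = a from rfl]
        rw [ih]
        simp [pvCnt, List.countP_cons, pvCoords?, h0, h1]
      | some y0 =>
        rw [show (match some x0, some y0 with
            | some x0', some y0' =>
              if (x0' == x && (y0' + 1 == y || y0' - 1 == y)) || (y0' == y && (x0' + 1 == x || x0' - 1 == x))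
              then a + 1 else a
            | _, _ => a) =
            (if (x0 == x && (y0 + 1 == y || y0 - 1 == y)) || (y0 == y && (x0 + 1 == x || x0 - 1 == x))
             then a + 1 else a) from rfl]
        rw [ih]
        simp only [pvCnt, List.countP_cons, pvCoords?, h0, h1, Option.some.injEq,
          beq_iff_eq, Prod.mk.injEq, Bool.or_eq_true, Bool.and_eq_true, decide_eq_true_eq]
        push_cast
        split_ifs <;> omega

-- pointwise bridge: B's counter test computes A's check
theorem pvDead_bridge (l : List (List Int)) (counts : PySem.Dict (Int × Int) Int)
    (cb rb : Int) (c : List Int)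
    (hc : ∀ k, counts.getD k 0 = pvCnt l k) :
    pvDeadCell counts cb rb c = pvCheckDeadEnd l c cb rb := by
  unfold pvDeadCell pvCheckDeadEnd pvCoords?
  cases h0 : PySem.List.pyGet? c 0 with
  | none => rfl
  | some x =>
    cases h1 : PySem.List.pyGet? c 1 with
    | none => rfl
    | some y =>
      simp only [hc, pvCalc_eq l x y 0, zero_add]
      split_ifs with hbB hbA hbA
      · exfalso
        simp only [Bool.and_eq_true, Bool.or_eq_true, decide_eq_true_eq] at hbB hbA
        omega
      · ring_nf
      · rfl
      · exfalso
        simp only [Bool.and_eq_true, Bool.or_eq_true, decide_eq_true_eq] at hbB hbA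
        omega

-- A's check depends on the current list only through the four neighbor counts
theorem pvCheck_congr (l1 l2 : List (List Int)) (cb rb : Int) (c : List Int) (x y : Int)
    (hc : pvCoords? c = some (x, y))
    (h1' : pvCnt l1 (x, y - 1) = pvCnt l2 (x, y - 1)) (h2 : pvCnt l1 (x, y + 1) = pvCnt l2 (x, y + 1))
    (h3 : pvCnt l1 (x - 1, y) = pvCnt l2 (x - 1, y)) (h4 : pvCnt l1 (x + 1, y) = pvCnt l2 (x + 1, y)) :
    pvCheckDeadEnd l1 c cb rb = pvCheckDeadEnd l2 c cb rb := by
  unfold pvCoords? at hc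
  split at hc
  next x' y' hg0 hg1 =>
    simp only [Option.some.injEq, Prod.mk.injEq] at hc
    obtain ⟨rfl, rfl⟩ := hc
    unfold pvCheckDeadEnd
    simp only [hg0, hg1, pvCalc_eq l1 x' y' 0, pvCalc_eq l2 x' y' 0, zero_add, h1', h2, h3, h4]
  next => simp at hc

-- unrolling A's loop: one pass over the snapshot finds the first dead end
theorem pvLoopA_eq_find (cb rb : Int) : ∀ (copy arr : List (List Int)),
    pvLoopA cb rb arr copy =
      match copy.find? (fun e => pvCheckDeadEnd arr e cb rb) with
      | none => arr
      | some el =>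
        match PySem.List.remove? arr el with
        | some arr2 => pvLoopA cb rb arr2 arr2
        | none => arr := by
  intro copy
  induction copy with
  | nil => intro arr; simp [pvLoopA]
  | cons el rest ih =>
    intro arr
    rw [pvLoopA]
    by_cases hd : pvCheckDeadEnd arr el cb rb
    · rw [if_pos hd, List.find?_cons_of_pos (p := fun e => pvCheckDeadEnd arr e cb rb) hd]
      split
      · next arr2 hrem => simp [hrem]
      · next hrem => simp [hrem]
    · rw [if_neg (by simp [hd]), List.find?_cons_of_neg (p := fun e => pvCheckDeadEnd arr e cb rb) (by simp [hd])]
      try exact ih arr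

theorem pvCnt_erase (l : List (List Int)) (el : List Int) (hel : el ∈ l) (k : Int × Int) :
    pvCnt (l.erase el) k = pvCnt l k - (if pvCoords? el == some k then 1 else 0) := by
  induction l with
  | nil => simp at hel
  | cons c t ih =>
    by_cases hce : c = el
    · subst hce
      simp only [pvCnt, List.erase_cons_head, List.countP_cons]
      split_ifs <;> push_cast <;> ring
    · have hmem : el ∈ t := by
        rcases List.mem_cons.mp hel with h | h
        · exact absurd h.symm hce
        · exact h
      rw [List.erase_cons_tail (by simpa using hce)]
      simp only [pvCnt, List.countP_cons] at *
      push_cast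
      push_cast at ih
      have := ih hmem
      omega

-- pos invariant: pvBuildPos indexes exactly the positions of each coordinate pair
theorem pvBuildPos_spec (arr : List (List Int)) (j : Nat) (k : Int × Int) :
    j ∈ (pvBuildPos arr).getD k [] ↔ (j < arr.length ∧ (arr[j]? >>= pvCoords?) = some k) := by
  have main : ∀ (cnt s : Nat) (d : PySem.Dict (Int × Int) (List Nat)),
      s + cnt = arr.length →
      (∀ j k, j ∈ d.getD k [] ↔ (j < s ∧ (arr[j]? >>= pvCoords?) = some k)) →
      (∀ j k, j ∈ ((List.range' s cnt).foldl (fun d i =>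
          match arr[i]? >>= pvCoords? with
          | some k => d.insert k (d.getD k [] ++ [i])
          | none => d) d).getD k [] ↔ (j < arr.length ∧ (arr[j]? >>= pvCoords?) = some k)) := by
    intro cnt
    induction cnt with
    | zero =>
      intro s d hs hd j k
      simp only [List.range'_zero, List.foldl_nil]
      rw [hd j k]
      have hs' : s = arr.length := by omega
      rw [hs']
    | succ cnt ih =>
      intro s d hs hd j k
      rw [List.range'_succ]
      simp only [List.foldl_cons]
      cases hco : arr[s]? >>= pvCoords? with
      | none =>
        rw [show (match (none : Option (Int × Int)) with
            | some k => d.insert k (d.getD k [] ++ [s])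
            | none => d) = d from rfl]
        exact ih (s+1) d (by omega) (by
          intro j' k'
          rw [hd j' k']
          constructor
          · rintro ⟨h1, h2⟩; exact ⟨by omega, h2⟩
          · rintro ⟨h1, h2⟩
            refine ⟨?_, h2⟩
            rcases Nat.lt_succ_iff_lt_or_eq.mp h1 with h | h
            · exact h
            · subst h; rw [hco] at h2; cases h2) j k
      | some k0 =>
        rw [show (match some k0 with
            | some k => d.insert k (d.getD k [] ++ [s])
            | none => d) = d.insert k0 (d.getD k0 [] ++ [s]) from rfl]
        refine ih (s+1) _ (by omega) ?_ j k
        intro j' k'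
        rw [PySem.Dict.getD_insert]
        by_cases hk : k' = k0
        · subst hk
          simp only [List.mem_append, List.mem_singleton, if_true, if_pos trivial]
          rw [hd j' k']
          constructor
          · rintro (⟨h1, h2⟩ | rfl)
            · exact ⟨by omega, h2⟩
            · exact ⟨by omega, hco⟩
          · rintro ⟨h1, h2⟩
            rcases Nat.lt_succ_iff_lt_or_eq.mp h1 with h | h
            · exact Or.inl ⟨h, h2⟩
            · exact Or.inr h
        · rw [if_neg hk, hd j' k']
          constructor
          · rintro ⟨h1, h2⟩; exact ⟨by omega, h2⟩
          · rintro ⟨h1, h2⟩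
            refine ⟨?_, h2⟩
            rcases Nat.lt_succ_iff_lt_or_eq.mp h1 with h | h
            · exact h
            · subst h; rw [hco] at h2; exact absurd (Option.some.inj h2).symm hk
  have h0 : ∀ j k, j ∈ (PySem.Dict.empty : PySem.Dict (Int × Int) (List Nat)).getD k [] ↔
      (j < 0 ∧ (arr[j]? >>= pvCoords?) = some k) := by
    intro j k
    simp [PySem.Dict.empty, PySem.Dict.getD, PySem.Dict.get?]
  have := main arr.length 0 PySem.Dict.empty (by omega) h0 j k
  unfold pvBuildPos
  rw [List.range_eq_range']
  exact this

-- getD/set helpers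
theorem pv_getD_set_self (l : List Bool) (m : Nat) (hm : m < l.length) (b : Bool) :
    (l.set m b).getD m false = b := by
  rw [List.getD_eq_getElem?_getD, List.getElem?_set_self (by simpa using hm)]
  rfl

theorem pv_getD_set_ne (l : List Bool) (m i : Nat) (h : i ≠ m) (b : Bool) :
    (l.set m b).getD i false = l.getD i false := by
  rw [List.getD_eq_getElem?_getD, List.getD_eq_getElem?_getD, List.getElem?_set_ne (by omega)]

theorem pv_getD_lt (l : List Bool) (m : Nat) (h : l.getD m false = true) : m < l.length := by
  by_contra hn
  rw [List.getD_eq_getElem?_getD, List.getElem?_eq_none (by omega)] at h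
  cases h

-- pvLive of all-true flags is the array itself
theorem pv_mem_add (d : List Nat) (j i : Nat) :
    i ∈ PySem.Set.add d j ↔ (i ∈ d ∨ i = j) := by
  simp only [PySem.Set.add]
  split
  · next h =>
    have hjd : j ∈ d := by simpa using h
    constructor
    · exact Or.inl
    · rintro (h' | rfl)
      · exact h'
      · exact hjd
  · simp

theorem pv_mem_discard (d : List Nat) (j i : Nat) :
    i ∈ PySem.Set.discard d j ↔ (i ∈ d ∧ i ≠ j) := by
  simp [PySem.Set.discard]

theorem pvLive_replicate (arr : List (List Int)) :
    pvLive arr (List.replicate arr.length true) = arr := by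
  have main : ∀ (cnt s : Nat), s + cnt = arr.length →
      (List.range' s cnt).filterMap
        (fun i => if (List.replicate arr.length true).getD i false then arr[i]? else none)
        = arr.drop s := by
    intro cnt
    induction cnt with
    | zero =>
      intro s hs
      rw [List.range'_zero, List.filterMap_nil, List.drop_eq_nil_of_le (by omega)]
    | succ cnt ih =>
      intro s hs
      rw [List.range'_succ]
      simp only [List.filterMap_cons]
      have hget : (List.replicate arr.length true).getD s false = true := by
        rw [List.getD_eq_getElem?_getD, List.getElem?_replicate, if_pos (by omega)]
        rfl
      rw [hget]
      simp only [if_true]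
      rw [List.getElem?_eq_getElem (by omega : s < arr.length)]
      rw [ih (s+1) (by omega)]
      exact (List.drop_eq_getElem_cons (by omega)).symm
  unfold pvLive
  rw [List.range_eq_range', main arr.length 0 (by omega), List.drop_zero]

-- membership in the live sublist
theorem pv_mem_live (arr : List (List Int)) (alive : List Bool) (el : List Int) :
    el ∈ pvLive arr alive ↔ ∃ j, j < arr.length ∧ alive.getD j false = true ∧ arr[j]? = some el := by
  unfold pvLive
  rw [List.mem_filterMap]
  constructor
  · rintro ⟨j, hj, hf⟩
    rw [List.mem_range] at hj
    by_cases ha : alive.getD j false = true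
    · rw [if_pos ha] at hf
      exact ⟨j, hj, ha, hf⟩
    · rw [if_neg ha] at hf; cases hf
  · rintro ⟨j, hj, ha, hf⟩
    exact ⟨j, List.mem_range.mpr hj, by rw [if_pos ha]; exact hf⟩

-- the scan lemma: if m is the first alive index whose cell passes P, then the first live
-- element passing P is arr[m], and erasing it from the live list kills exactly flag m
theorem pvLive_find_erase (arr : List (List Int)) (alive : List Bool) (P : List Int → Bool)
    (m : Nat) (hm : m < arr.length) (hal : alive.getD m false = true)
    (hPm : P (arr[m]'hm) = true)
    (hfst : ∀ j (hj : j < arr.length), j < m → alive.getD j false = true → P (arr[j]'hj) = false) :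
    List.find? P (pvLive arr alive) = some (arr[m]'hm) ∧
    (pvLive arr alive).erase (arr[m]'hm) = pvLive arr (alive.set m false) := by
  have main : ∀ (cnt s : Nat), s + cnt = arr.length → s ≤ m →
      List.find? P ((List.range' s cnt).filterMap
          (fun i => if alive.getD i false then arr[i]? else none)) = some (arr[m]'hm) ∧
      ((List.range' s cnt).filterMap
          (fun i => if alive.getD i false then arr[i]? else none)).erase (arr[m]'hm)
        = (List.range' s cnt).filterMap
          (fun i => if (alive.set m false).getD i false then arr[i]? else none) := by
    intro cnt
    induction cnt with
    | zero => intro s hs hsm; omega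
    | succ cnt ih =>
      intro s hs hsm
      rw [List.range'_succ]
      simp only [List.filterMap_cons]
      by_cases hsmeq : s = m
      · subst hsmeq
        rw [if_pos hal, pv_getD_set_self alive s (pv_getD_lt alive s hal) false]
        simp only [Bool.false_eq_true, if_false]
        rw [List.getElem?_eq_getElem hm]
        have hcongr : (List.range' (s+1) cnt).filterMap
            (fun i => if alive.getD i false then arr[i]? else none)
          = (List.range' (s+1) cnt).filterMap
            (fun i => if (alive.set s false).getD i false then arr[i]? else none) := by
          apply List.filterMap_congr
          intro i hi
          rw [List.mem_range'] at hi
          rw [pv_getD_set_ne alive s i (by omega) false]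
        constructor
        · rw [List.find?_cons_of_pos (p := P) hPm]
        · rw [List.erase_cons_head, hcongr]
      · have hslt : s < m := by omega
        by_cases has : alive.getD s false = true
        · rw [if_pos has, pv_getD_set_ne alive m s (by omega) false, if_pos has]
          have hsn : s < arr.length := by omega
          rw [List.getElem?_eq_getElem hsn]
          have hPs : P (arr[s]'hsn) = false := hfst s hsn hslt has
          have hne : arr[s]'hsn ≠ arr[m]'hm := by
            intro he
            rw [he, hPm] at hPs
            cases hPs
          obtain ⟨ih1, ih2⟩ := ih (s+1) (by omega) (by omega)
          constructor
          · rw [List.find?_cons_of_neg (p := P) (by simp [hPs]), ih1]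
          · rw [List.erase_cons_tail (by simpa using hne), ih2]
        · rw [if_neg has, pv_getD_set_ne alive m s (by omega) false, if_neg has]
          exact ih (s+1) (by omega) (by omega)
  have := main arr.length 0 (by omega) (by omega)
  unfold pvLive
  rw [List.range_eq_range']
  exact this

-- membership after the repair fold: indices in js get their current status, others keep it
theorem pvRepair_mem (arr : List (List Int)) (counts : PySem.Dict (Int × Int) Int)
    (cb rb : Int) (alive : List Bool) (i : Nat) :
    ∀ (js : List Nat) (d0 : List Nat),
    (i ∈ pvRepair arr counts cb rb alive d0 js) ↔
      (if i ∈ js ∧ alive.getD i false = true then pvDeadIdx arr counts cb rb i = true else i ∈ d0) := by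
  intro js
  induction js with
  | nil =>
    intro d0
    rw [if_neg (by simp)]
    exact Iff.rfl
  | cons j rest ih =>
    intro d0
    have hstep : pvRepair arr counts cb rb alive d0 (j :: rest)
        = pvRepair arr counts cb rb alive
            (if alive.getD j false then
              if pvDeadIdx arr counts cb rb j then PySem.Set.add d0 j
              else PySem.Set.discard d0 j
            else d0) rest := rfl
    rw [hstep, ih]
    by_cases hji : j = i
    · subst hji
      by_cases hai : alive.getD j false = true
      · rw [if_pos (c := j ∈ j :: rest ∧ alive.getD j false = true) ⟨List.mem_cons_self, hai⟩]
        by_cases hir : j ∈ rest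
        · rw [if_pos (c := j ∈ rest ∧ alive.getD j false = true) ⟨hir, hai⟩]
        · rw [if_neg (c := j ∈ rest ∧ alive.getD j false = true) (fun hc => hir hc.1),
              if_pos (c := alive.getD j false = true) hai]
          by_cases hdj : pvDeadIdx arr counts cb rb j = true
          · rw [if_pos (c := pvDeadIdx arr counts cb rb j = true) hdj, pv_mem_add]
            simp [hdj]
          · rw [if_neg (c := pvDeadIdx arr counts cb rb j = true) hdj, pv_mem_discard]
            simp [hdj]
      · rw [if_neg (c := j ∈ j :: rest ∧ alive.getD j false = true) (fun hc => hai hc.2),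
            if_neg (c := j ∈ rest ∧ alive.getD j false = true) (fun hc => hai hc.2),
            if_neg (c := alive.getD j false = true) hai]
    · have hupd : (i ∈ (if alive.getD j false = true then
              if pvDeadIdx arr counts cb rb j = true then PySem.Set.add d0 j
              else PySem.Set.discard d0 j
            else d0)) ↔ i ∈ d0 := by
        split
        · split
          · rw [pv_mem_add]; simp [Ne.symm hji]
          · rw [pv_mem_discard]; simp [Ne.symm hji]
        · exact Iff.rfl
      by_cases hc : i ∈ rest ∧ alive.getD i false = true
      · rw [if_pos (c := i ∈ rest ∧ alive.getD i false = true) hc,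
            if_pos (c := i ∈ j :: rest ∧ alive.getD i false = true) ⟨List.mem_cons_of_mem j hc.1, hc.2⟩]
      · rw [if_neg (c := i ∈ rest ∧ alive.getD i false = true) hc,
            if_neg (c := i ∈ j :: rest ∧ alive.getD i false = true)
              (fun hc2 => hc ⟨(List.mem_cons.mp hc2.1).resolve_left (Ne.symm hji), hc2.2⟩)]
        exact hupd

theorem pvRepair_nodup (arr : List (List Int)) (counts : PySem.Dict (Int × Int) Int)
    (cb rb : Int) (alive : List Bool) :
    ∀ (js : List Nat) (d0 : List Nat), d0.Nodup → (pvRepair arr counts cb rb alive d0 js).Nodup := by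
  intro js
  induction js with
  | nil => intro d0 h; exact h
  | cons j rest ih =>
    intro d0 h
    have hstep : pvRepair arr counts cb rb alive d0 (j :: rest)
        = pvRepair arr counts cb rb alive
            (if alive.getD j false then
              if pvDeadIdx arr counts cb rb j then PySem.Set.add d0 j
              else PySem.Set.discard d0 j
            else d0) rest := rfl
    rw [hstep]
    apply ih
    split
    · split
      · simp only [PySem.Set.add]
        split
        · exact h
        · next hcon =>
          have hcon' : j ∉ d0 := by simpa using hcon
          rw [List.nodup_append]
          refine ⟨h, List.nodup_singleton j, ?_⟩
          intro a ha b hb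
          rw [List.mem_singleton] at hb
          subst hb
          exact fun haj => hcon' (haj ▸ ha)
      · exact List.Nodup.filter _ h
    · exact h

-- the loop invariant
def pvInv (arr : List (List Int)) (cb rb : Int) (counts : PySem.Dict (Int × Int) Int)
    (pos : PySem.Dict (Int × Int) (List Nat)) (alive : List Bool) (dead : List Nat) : Prop :=
  alive.length = arr.length ∧
  (∀ k, counts.getD k 0 = pvCnt (pvLive arr alive) k) ∧
  dead.Nodup ∧
  (∀ j k, j ∈ pos.getD k [] ↔ (j < arr.length ∧ (arr[j]? >>= pvCoords?) = some k)) ∧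
  (∀ i (hi : i < arr.length), (i ∈ dead ↔ (alive.getD i false = true ∧
      pvCheckDeadEnd (pvLive arr alive) (arr[i]'hi) cb rb = true))) ∧
  (∀ i ∈ dead, i < arr.length)

-- coordinates of an in-range cell are defined under Pre_
theorem pv_coords_at (arr : List (List Int)) (m : Nat) (hm : m < arr.length)
    (h2 : 2 ≤ (arr[m]'hm).length) :
    arr[m]? >>= pvCoords? = some ((arr[m]'hm)[0]'(by omega), (arr[m]'hm)[1]'(by omega)) := by
  rw [List.getElem?_eq_getElem hm]
  show pvCoords? (arr[m]'hm) = _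
  unfold pvCoords?
  rw [show PySem.List.pyGet? (arr[m]'hm) 0 = some ((arr[m]'hm)[0]'(by omega)) from by
    simpa using PySem.List.pyGet?_ofNat (arr[m]'hm) 0 (by omega)]
  rw [show PySem.List.pyGet? (arr[m]'hm) 1 = some ((arr[m]'hm)[1]'(by omega)) from by
    simpa using PySem.List.pyGet?_ofNat (arr[m]'hm) 1 (by omega)]

theorem pvDeadIdx_at (arr : List (List Int)) (counts : PySem.Dict (Int × Int) Int)
    (cb rb : Int) (i : Nat) (hi : i < arr.length) :
    pvDeadIdx arr counts cb rb i = pvDeadCell counts cb rb (arr[i]'hi) := by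
  unfold pvDeadIdx
  rw [List.getElem?_eq_getElem hi]

-- main induction along B's loop
theorem pvMain (arr : List (List Int)) (cb rb : Int)
    (hpre : ∀ c ∈ arr, 2 ≤ c.length)
    (pos : PySem.Dict (Int × Int) (List Nat)) :
    ∀ (counts : PySem.Dict (Int × Int) Int) (alive : List Bool) (dead : List Nat),
    pvInv arr cb rb counts pos alive dead →
    pvLoopA cb rb (pvLive arr alive) (pvLive arr alive)
      = pvLive arr (pvLoopB arr cb rb pos counts alive dead) := by
  intro counts alive dead
  induction counts, alive, dead using pvLoopB.induct (arr := arr) (col_bound := cb) (row_bound := rb) (pos := pos) with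
  | case1 counts alive dead hmin =>
    intro hinv
    obtain ⟨hlen, hcnt, hnodup, hpos, hdead, hdlt⟩ := hinv
    have hdnil : dead = [] := (PySem.List.min?_eq_none_iff dead _).mp hmin
    subst hdnil
    have hB : pvLoopB arr cb rb pos counts alive [] = alive := by
      rw [pvLoopB]
      rfl
    rw [hB, pvLoopA_eq_find]
    have hfind : (pvLive arr alive).find? (fun e => pvCheckDeadEnd (pvLive arr alive) e cb rb) = none := by
      rw [List.find?_eq_none]
      intro el hel
      obtain ⟨j, hj, haj, hgetj⟩ := (pv_mem_live arr alive el).mp hel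
      have helj : el = arr[j]'hj := by
        rw [List.getElem?_eq_getElem hj] at hgetj
        exact (Option.some.inj hgetj).symm
      subst helj
      have hnd : ¬ (j ∈ ([] : List Nat)) := by simp
      rw [hdead j hj] at hnd
      simp only [haj, true_and] at hnd
      simp [hnd]
    rw [hfind]
  | case2 counts alive dead m hmin hal hco =>
    intro hinv
    obtain ⟨hlen, hcnt, hnodup, hpos, hdead, hdlt⟩ := hinv
    have hmn : m < arr.length := hdlt m (PySem.List.min?_mem hmin)
    have hco' := pv_coords_at arr m hmn (hpre _ (List.getElem_mem hmn))
    rw [hco] at hco'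
    cases hco'
  | case3 counts alive dead m hmin dead1 hal alive' x y hco counts' js ih =>
    intro hinv
    obtain ⟨hlen, hcnt, hnodup, hpos, hdead, hdlt⟩ := hinv
    have hmem : m ∈ dead := PySem.List.min?_mem hmin
    have hmn : m < arr.length := hdlt m hmem
    have hml : 2 ≤ (arr[m]'hmn).length := hpre _ (List.getElem_mem hmn)
    have hchk : pvCheckDeadEnd (pvLive arr alive) (arr[m]'hmn) cb rb = true :=
      ((hdead m hmn).mp hmem).2
    have hcoords : pvCoords? (arr[m]'hmn) = some (x, y) := by
      rw [List.getElem?_eq_getElem hmn] at hco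
      simpa using hco
    -- earlier alive cells are not dead ends
    have hfst : ∀ j (hj : j < arr.length), j < m → alive.getD j false = true →
        pvCheckDeadEnd (pvLive arr alive) (arr[j]'hj) cb rb = false := by
      intro j hj hjm haj
      by_contra hP
      have hP' : pvCheckDeadEnd (pvLive arr alive) (arr[j]'hj) cb rb = true := by
        revert hP; cases pvCheckDeadEnd (pvLive arr alive) (arr[j]'hj) cb rb <;> simp
      have hjd : j ∈ dead := (hdead j hj).mpr ⟨haj, hP'⟩
      have := PySem.List.min?_isMin hmin j hjd
      omega
    obtain ⟨hfind, herase⟩ := pvLive_find_erase arr alive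
      (fun e => pvCheckDeadEnd (pvLive arr alive) e cb rb) m hmn hal hchk hfst
    have halive' : alive' = alive.set m false := rfl
    have hcounts' : counts' = counts.insert (x, y) (counts.getD (x, y) 0 - 1) := rfl
    have hjs : js = pos.getD (x, y - 1) [] ++ pos.getD (x, y + 1) [] ++
              pos.getD (x - 1, y) [] ++ pos.getD (x + 1, y) [] := rfl
    have hdead1 : dead1 = PySem.Set.discard dead m := rfl
    -- one step of A
    have hmemlive : arr[m]'hmn ∈ pvLive arr alive := List.mem_of_find?_eq_some hfind
    rw [pvLoopA_eq_find]
    simp only [hfind, PySem.List.remove?_eq_some_erase _ _ hmemlive]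
    rw [herase, ← halive']
    -- one step of B
    have hB : pvLoopB arr cb rb pos counts alive dead
        = pvLoopB arr cb rb pos counts' alive'
            (pvRepair arr counts' cb rb alive' dead1 js) := by
      rw [pvLoopB]
      split
      · next heq => rw [hmin] at heq; cases heq
      · next m' heq =>
        rw [hmin] at heq
        obtain rfl : m' = m := (Option.some.inj heq).symm
        rw [dif_pos hal]
        simp only [hco]
        rfl
    rw [hB]
    set dead' := pvRepair arr counts' cb rb alive' dead1 js with hdead'
    -- the new live list
    have hlive' : pvLive arr alive' = (pvLive arr alive).erase (arr[m]'hmn) := by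
      rw [halive']
      exact herase.symm
    -- new counter invariant
    have hcnt' : ∀ k, counts'.getD k 0 = pvCnt (pvLive arr alive') k := by
      intro k
      rw [hlive', pvCnt_erase _ _ hmemlive k, hcounts', PySem.Dict.getD_insert]
      by_cases hk : k = (x, y)
      · subst hk
        rw [if_pos rfl, hcnt, hcoords]
        simp
      · rw [if_neg hk, hcnt]
        have : (pvCoords? (arr[m]'hmn) == some k) = false := by
          rw [hcoords]
          simp [Ne.symm, hk]
        rw [this]
        simp
    -- membership in js means the cell sits on one of the four neighbour coordinates
    have hjs_mem : ∀ i, i ∈ js ↔ (i < arr.length ∧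
        ((arr[i]? >>= pvCoords?) = some (x, y - 1) ∨ (arr[i]? >>= pvCoords?) = some (x, y + 1) ∨
         (arr[i]? >>= pvCoords?) = some (x - 1, y) ∨ (arr[i]? >>= pvCoords?) = some (x + 1, y))) := by
      intro i
      rw [hjs]
      simp only [List.mem_append, hpos]
      constructor
      · rintro (((⟨h1, h2⟩ | ⟨h1, h2⟩) | ⟨h1, h2⟩) | ⟨h1, h2⟩) <;> exact ⟨h1, by tauto⟩
      · rintro ⟨h1, (h2 | h2 | h2 | h2)⟩ <;> tauto
    -- the new dead set is correct
    have hdeadinv : ∀ i (hi : i < arr.length), (i ∈ dead' ↔ (alive'.getD i false = true ∧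
        pvCheckDeadEnd (pvLive arr alive') (arr[i]'hi) cb rb = true)) := by
      intro i hi
      rw [hdead', pvRepair_mem]
      by_cases hc : i ∈ js ∧ alive'.getD i false = true
      · rw [if_pos hc]
        rw [pvDeadIdx_at arr counts' cb rb i hi]
        rw [pvDead_bridge (pvLive arr alive') counts' cb rb _ hcnt']
        constructor
        · intro h
          exact ⟨hc.2, h⟩
        · rintro ⟨_, h⟩
          exact h
      · rw [if_neg hc, hdead1, pv_mem_discard]
        by_cases hia : alive'.getD i false = true
        · have hijs : ¬ i ∈ js := fun h => hc ⟨h, hia⟩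
          have him : i ≠ m := by
            intro he
            subst he
            rw [halive', pv_getD_set_self alive i (pv_getD_lt alive i hal) false] at hia
            cases hia
          have haio : alive.getD i false = true := by
            rw [halive', pv_getD_set_ne alive m i him false] at hia
            exact hia
          have h2i : 2 ≤ (arr[i]'hi).length := hpre _ (List.getElem_mem hi)
          have hcoi := pv_coords_at arr i hi h2i
          have hchkeq : pvCheckDeadEnd (pvLive arr alive) (arr[i]'hi) cb rb
              = pvCheckDeadEnd (pvLive arr alive') (arr[i]'hi) cb rb := by
            have hcoi' : pvCoords? (arr[i]'hi) = some ((arr[i]'hi)[0]'(by omega), (arr[i]'hi)[1]'(by omega)) := by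
              rw [List.getElem?_eq_getElem hi] at hcoi
              simpa using hcoi
            have hcnt_eq : ∀ k', k' ≠ (x, y) → pvCnt (pvLive arr alive) k' = pvCnt (pvLive arr alive') k' := by
              intro k' hk'
              rw [hlive', pvCnt_erase _ _ hmemlive k', hcoords]
              have : ((some (x, y) : Option (Int × Int)) == some k') = false := by
                simp [Ne.symm, hk']
              rw [this]
              simp
            have hsetup : (pvCoords? (arr[i]'hi) = some (x, y - 1) ∨
                  pvCoords? (arr[i]'hi) = some (x, y + 1) ∨
                  pvCoords? (arr[i]'hi) = some (x - 1, y) ∨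
                  pvCoords? (arr[i]'hi) = some (x + 1, y)) → False := by
              intro hdis
              apply hijs
              rw [hjs_mem]
              refine ⟨hi, ?_⟩
              rw [List.getElem?_eq_getElem hi]
              show (pvCoords? (arr[i]'hi) = some (x, y - 1)) ∨ (pvCoords? (arr[i]'hi) = some (x, y + 1)) ∨
                   (pvCoords? (arr[i]'hi) = some (x - 1, y)) ∨ (pvCoords? (arr[i]'hi) = some (x + 1, y))
              exact hdis
            apply pvCheck_congr _ _ cb rb _ _ _ hcoi'
            · apply hcnt_eq
              intro hk'
              refine hsetup (Or.inr (Or.inl ?_))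
              rw [hcoi', Prod.mk.injEq] at *
              obtain ⟨hk1, hk2⟩ := hk'
              simp only [Option.some.injEq, Prod.mk.injEq]
              omega
            · apply hcnt_eq
              intro hk'
              refine hsetup (Or.inl ?_)
              rw [hcoi', Prod.mk.injEq] at *
              obtain ⟨hk1, hk2⟩ := hk'
              simp only [Option.some.injEq, Prod.mk.injEq]
              omega
            · apply hcnt_eq
              intro hk'
              refine hsetup (Or.inr (Or.inr (Or.inr ?_)))
              rw [hcoi', Prod.mk.injEq] at *
              obtain ⟨hk1, hk2⟩ := hk'
              simp only [Option.some.injEq, Prod.mk.injEq]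
              omega
            · apply hcnt_eq
              intro hk'
              refine hsetup (Or.inr (Or.inr (Or.inl ?_)))
              rw [hcoi', Prod.mk.injEq] at *
              obtain ⟨hk1, hk2⟩ := hk'
              simp only [Option.some.injEq, Prod.mk.injEq]
              omega
          constructor
          · rintro ⟨hid, _⟩
            refine ⟨hia, ?_⟩
            rw [← hchkeq]
            exact ((hdead i hi).mp hid).2
          · rintro ⟨_, hck⟩
            refine ⟨(hdead i hi).mpr ⟨haio, ?_⟩, him⟩
            rw [hchkeq]
            exact hck
        · constructor
          · rintro ⟨hid, him⟩
            have haio : alive.getD i false = true := ((hdead i hi).mp hid).1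
            exfalso
            rw [halive', pv_getD_set_ne alive m i him false] at hia
            exact hia haio
          · rintro ⟨h1, _⟩
            exact absurd h1 hia
    -- assemble the new invariant and recurse
    apply ih
    refine ⟨by rw [halive', List.length_set]; exact hlen, hcnt', ?_, hpos, hdeadinv, ?_⟩
    · rw [hdead']
      exact pvRepair_nodup arr counts' cb rb alive' js dead1
        (hdead1 ▸ List.Nodup.filter _ hnodup)
    · intro i hid
      rw [hdead', pvRepair_mem] at hid
      by_cases hc : i ∈ js ∧ alive'.getD i false = true
      · exact ((hjs_mem i).mp hc.1).1
      · rw [if_neg hc, hdead1, pv_mem_discard] at hid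
        exact hdlt i hid.1
  | case4 counts alive dead m hmin dead1 hal ih =>
    intro hinv
    obtain ⟨hlen, hcnt, hnodup, hpos, hdead, hdlt⟩ := hinv
    have hmem : m ∈ dead := PySem.List.min?_mem hmin
    have hmn : m < arr.length := hdlt m hmem
    exact absurd ((hdead m hmn).mp hmem).1 hal


-- ===== VERDICT (by name: the statement is the Claim_ definition above) =====
theorem remove_dead_ends_spec : Claim_equal_remove_dead_ends := by
  intro arr cb rb _ hpre
  unfold Spec_remove_dead_ends remove_dead_ends remove_dead_ends_alt
  have hinv0 : pvInv arr cb rb (pvBuildCounts arr) (pvBuildPos arr)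
      (List.replicate arr.length true)
      ((List.range arr.length).filter (pvDeadIdx arr (pvBuildCounts arr) cb rb)) := by
    refine ⟨List.length_replicate, ?_, List.Nodup.filter _ List.nodup_range,
      fun j k => pvBuildPos_spec arr j k, ?_, ?_⟩
    · intro k
      rw [pvLive_replicate]
      exact pvBuildCounts_spec arr k
    · intro i hi
      rw [List.mem_filter, List.mem_range]
      have hgd : (List.replicate arr.length true).getD i false = true := by
        rw [List.getD_eq_getElem?_getD, List.getElem?_replicate, if_pos hi]
        rfl
      rw [pvDeadIdx_at arr (pvBuildCounts arr) cb rb i hi]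
      rw [pvDead_bridge arr (pvBuildCounts arr) cb rb _ (fun k => pvBuildCounts_spec arr k)]
      rw [pvLive_replicate]
      simp [hi, hgd]
    · intro i hid
      rw [List.mem_filter, List.mem_range] at hid
      exact hid.1
  have h0 := pvMain arr cb rb hpre (pvBuildPos arr) (pvBuildCounts arr)
      (List.replicate arr.length true)
      ((List.range arr.length).filter (pvDeadIdx arr (pvBuildCounts arr) cb rb)) hinv0
  rw [pvLive_replicate] at h0
  exact h0
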